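-- pv_equiv track=rewrite | github.com/enriquedlh97/algoDS | algosds/problems/patterns/miscellaneous/searching/find_three_largest_numbers.py | find_three_largest_numbers_elif
-- ===== SOURCE A (Python) =====
-- from collections import deque
--
-- def find_three_largest_numbers_elif(array):
--     # largest_integers = deque([float('-inf'), float('-inf'), float('-inf')])
--     largest_integers = deque([float('-inf') for _ in "123"])
--
--     for idx in range(len(array)):
--
--         if array[idx] >= largest_integers[2]:
--
--             largest_integers.append(array[idx])
--             largest_integers.popleft()
--
--         elif largest_integers[1] <= array[idx] <= largest_integers[2]:
--
--             largest_integers.popleft()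
--             shifted_value = largest_integers.popleft()
--             largest_integers.appendleft(array[idx])
--             largest_integers.appendleft(shifted_value)
--
--         elif largest_integers[0] <= array[idx] <= largest_integers[1]:
--
--             largest_integers[0] = array[idx]
--             largest_integers.popleft()
--             largest_integers.appendleft(array[idx])
--
--     return list(largest_integers)
-- ===== SOURCE B (Python) =====
-- def find_three_largest_numbers_elif(array):
--     # Simpler: sort ascending and take the last three (the three largest, ascending).
--     return sorted(array)[-3:]
-- ===== Notes on version B (the rewrite author's own statement) =====
-- stated objective: simpler
-- what changed: Replaces the single-pass deque maintenance with an elif ladder by one sort followed by a [-3:] slice.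
-- outside the precondition, e.g. on find_three_largest_numbers_elif([5]): A returns [-inf, -inf, 5], B returns [5]; on find_three_largest_numbers_elif([]): A returns [-inf, -inf, -inf], B returns []
import Mathlib
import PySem

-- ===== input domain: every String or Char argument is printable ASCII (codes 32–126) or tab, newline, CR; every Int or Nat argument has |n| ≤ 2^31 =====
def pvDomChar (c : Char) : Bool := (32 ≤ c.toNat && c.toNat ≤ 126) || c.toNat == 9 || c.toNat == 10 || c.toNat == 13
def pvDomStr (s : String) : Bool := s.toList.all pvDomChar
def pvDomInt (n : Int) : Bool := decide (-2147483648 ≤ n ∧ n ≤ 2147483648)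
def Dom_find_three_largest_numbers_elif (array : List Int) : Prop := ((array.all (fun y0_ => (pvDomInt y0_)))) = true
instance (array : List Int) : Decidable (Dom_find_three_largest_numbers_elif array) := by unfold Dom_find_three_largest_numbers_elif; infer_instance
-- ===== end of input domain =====

-- B replaces A's single-pass three-element deque maintenance (elif ladder) by one sort plus a [-3:] slice; simpler, same values.


-- ===== PORT A =====
-- The deque always holds exactly three entries; `none` models the float('-inf') placeholders,
-- `pvLeE` is Python's `<=` on that extended domain (-inf <= x always, x <= -inf never for finite x).
def pvLeE : Option Int → Option Int → Bool
  | none, _ => true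
  | some _, none => false
  | some a, some b => decide (a ≤ b)

-- One iteration of A's loop body on the three-element deque [d0, d1, d2] (deque ops inlined):
-- branch 1: append x, popleft; branch 2: popleft, popleft, appendleft x, appendleft shifted;
-- branch 3: d[0] := x, popleft, appendleft x.
def pvStepA (d : List (Option Int)) (x : Int) : List (Option Int) :=
  match d with
  | [a, b, c] =>
    if pvLeE c (some x) then [b, c, some x]
    else if pvLeE b (some x) && pvLeE (some x) c then [b, some x, c]
    else if pvLeE a (some x) && pvLeE (some x) b then [some x, b, c]
    else [a, b, c]
  | d => d

-- `for idx in range(len(array)): ... array[idx] ...`; the index is always in range so the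
-- pyGetD default is unreachable. `list(deque)` must be a List Int: the surviving entries are
-- unwrapped with filterMap id — placeholders can only remain when the input has fewer than
-- three elements, where the Python A returns float('-inf') entries (no Int value; excluded by Pre_).
def find_three_largest_numbers_elif (array : List Int) : List Int :=
  ((PySem.List.pyRange 0 (PySem.List.len array)).foldl
      (fun d idx => pvStepA d (PySem.List.pyGetD array idx 0))
      [none, none, none]).filterMap id

-- ===== PORT B =====
-- sorted(array)[-3:]
def find_three_largest_numbers_elif_alt (array : List Int) : List Int :=
  PySem.List.slice (PySem.List.sorted array (fun x => x) false) (some (-3)) none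

-- ===== PRECONDITION & SPEC =====
-- Pre_ excludes arrays with fewer than three elements: there A returns a list still containing
-- float('-inf') placeholders, which is not a value of type List Int (B naturally returns the
-- shorter sorted list instead).
def Pre_find_three_largest_numbers_elif (array : List Int) : Prop := 3 ≤ array.length
instance (array : List Int) : Decidable (Pre_find_three_largest_numbers_elif array) := by
  unfold Pre_find_three_largest_numbers_elif; infer_instance

def pvWitness_find_three_largest_numbers_elif : List Int := [7, -2, 7, 0]

def Spec_find_three_largest_numbers_elif (array : List Int) (out : List Int) : Prop := out = find_three_largest_numbers_elif_alt array
instance (array : List Int) (out : List Int) : Decidable (Spec_find_three_largest_numbers_elif array out) := by unfold Spec_find_three_largest_numbers_elif; infer_instance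

-- ===== CLAIM (what is proved, stated in full; the proofs are below) =====
def Claim_equal_find_three_largest_numbers_elif : Prop := ∀ (array : List Int), Dom_find_three_largest_numbers_elif array → Pre_find_three_largest_numbers_elif array → Spec_find_three_largest_numbers_elif array (find_three_largest_numbers_elif array)

-- ===== LEMMAS AND PROOFS =====

-- Insertion step of PySem's stable sort, specialised to identity key.
def pvIns (x : Int) (s : List Int) : List Int :=
  PySem.List.insertBy (fun a b => decide (a < b)) x s

-- The deque state determined by the sorted prefix seen so far: pad with `none` below three
-- elements, otherwise the last three (largest) entries.
def pvMk3 (s : List Int) : List (Option Int) :=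
  List.replicate (3 - s.length) none ++ (s.drop (s.length - 3)).map some

theorem pvIns_all_le (x : Int) (s : List Int) (h : ∀ y ∈ s, y ≤ x) :
    pvIns x s = s ++ [x] := by
  induction s with
  | nil => rfl
  | cons y ys ih =>
    have hy : ¬ (x < y) := not_lt.mpr (h y (by simp))
    simp only [pvIns, PySem.List.insertBy, decide_eq_true_eq]
    rw [if_neg hy, List.cons_append]
    exact congrArg (List.cons y) (ih (fun z hz => h z (by simp [hz])))

theorem pvIns_append_cons (x y : Int) (p q : List Int)
    (hp : ∀ z ∈ p, z ≤ x) (hy : x < y) :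
    pvIns x (p ++ y :: q) = p ++ x :: y :: q := by
  induction p with
  | nil => simp [pvIns, PySem.List.insertBy, hy]
  | cons z zs ih =>
    have hz : ¬ (x < z) := not_lt.mpr (hp z (by simp))
    simp only [pvIns, PySem.List.insertBy, decide_eq_true_eq, List.cons_append]
    rw [if_neg hz]
    exact congrArg (List.cons z) (ih (fun w hw => hp w (by simp [hw])))

theorem pvIns_parts (x : Int) (s : List Int) :
    ∃ p q, s = p ++ q ∧ pvIns x s = p ++ x :: q ∧ ∀ z ∈ p, z ≤ x := by
  induction s with
  | nil => exact ⟨[], [], rfl, rfl, by simp⟩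
  | cons y ys ih =>
    by_cases hy : x < y
    · exact ⟨[], y :: ys, rfl, by simp [pvIns, PySem.List.insertBy, hy], by simp⟩
    · obtain ⟨p, q, hs, hins, hp⟩ := ih
      refine ⟨y :: p, q, by simp [hs], ?_, ?_⟩
      · simpa [pvIns, PySem.List.insertBy, hy, hs] using hins
      · intro z hz
        rcases List.mem_cons.mp hz with hz | hz
        · exact hz ▸ le_of_not_gt hy
        · exact hp z hz

theorem pvMk3_append (w : List Int) (a b c : Int) :
    pvMk3 (w ++ [a, b, c]) = [some a, some b, some c] := by
  unfold pvMk3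
  rw [List.length_append]
  simp only [List.length_cons, List.length_nil]
  rw [show 3 - (w.length + (0 + 1 + 1 + 1)) = 0 by omega,
    show w.length + (0 + 1 + 1 + 1) - 3 = w.length by omega]
  simp

theorem exists_append_three (s : List Int) (h : 3 ≤ s.length) :
    ∃ u a b c, s = u ++ [a, b, c] := by
  rcases hr : s.reverse with _ | ⟨c, _ | ⟨b, _ | ⟨a, t⟩⟩⟩ <;>
    [skip; skip; skip;
     · refine ⟨t.reverse, a, b, c, ?_⟩
       have := congrArg List.reverse hr
       simpa using this] <;>
    · exfalso
      have := congrArg List.length hr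
      rw [List.length_reverse] at this
      simp only [List.length_cons, List.length_nil] at this
      omega

-- Core lemma: on the deque state of a sorted list, one A-step is "insert, keep last three".
theorem pvStepA_mk3 (s : List Int) (hs : s.Pairwise (· ≤ ·)) (x : Int) :
    pvStepA (pvMk3 s) x = pvMk3 (pvIns x s) := by
  by_cases h3 : 3 ≤ s.length
  · obtain ⟨u, a, b, c, rfl⟩ := exists_append_three s h3
    rw [List.pairwise_append] at hs
    obtain ⟨-, habc, hu⟩ := hs
    simp only [List.pairwise_cons, List.mem_cons] at habc
    have hab : a ≤ b := habc.1 b (Or.inl rfl)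
    have hbc : b ≤ c := habc.2.1 c (Or.inl rfl)
    have hua : ∀ y ∈ u, y ≤ a := fun y hy => hu y hy a (by simp)
    have hub : ∀ y ∈ u, y ≤ b := fun y hy => hu y hy b (by simp)
    rw [pvMk3_append]
    by_cases h1 : c ≤ x
    · have hall : ∀ y ∈ u ++ [a, b, c], y ≤ x := by
        intro y hy
        rcases List.mem_append.mp hy with hy | hy
        · exact le_trans (le_trans (hua y hy) (le_trans hab hbc)) h1
        · rcases List.mem_cons.mp hy with rfl | hy
          · exact le_trans (le_trans hab hbc) h1
          rcases List.mem_cons.mp hy with rfl | hy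
          · exact le_trans hbc h1
          · simp at hy; subst hy; exact h1
      rw [pvIns_all_le x _ hall,
        show (u ++ [a, b, c]) ++ [x] = (u ++ [a]) ++ [b, c, x] by simp, pvMk3_append]
      simp [pvStepA, pvLeE, h1]
    · by_cases h2 : b ≤ x
      · have hx : x < c := lt_of_not_ge h1
        have hp : ∀ z ∈ u ++ [a, b], z ≤ x := by
          intro z hz
          rcases List.mem_append.mp hz with hz | hz
          · exact le_trans (hub z hz) h2
          · rcases List.mem_cons.mp hz with rfl | hz
            · exact le_trans hab h2
            · simp at hz; subst hz; exact h2
        rw [show u ++ [a, b, c] = (u ++ [a, b]) ++ c :: [] by simp,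
          pvIns_append_cons x c (u ++ [a, b]) [] hp hx,
          show (u ++ [a, b]) ++ x :: c :: [] = (u ++ [a]) ++ [b, x, c] by simp, pvMk3_append]
        simp [pvStepA, pvLeE, h1, h2, le_of_lt hx]
      · by_cases ha : a ≤ x
        · have hx : x < b := lt_of_not_ge h2
          have hp : ∀ z ∈ u ++ [a], z ≤ x := by
            intro z hz
            rcases List.mem_append.mp hz with hz | hz
            · exact le_trans (hua z hz) ha
            · simp at hz; subst hz; exact ha
          rw [show u ++ [a, b, c] = (u ++ [a]) ++ b :: [c] by simp,
            pvIns_append_cons x b (u ++ [a]) [c] hp hx,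
            show (u ++ [a]) ++ x :: b :: [c] = (u ++ [a]) ++ [x, b, c] by simp, pvMk3_append]
          have hxc : x ≤ c := le_of_lt (lt_of_lt_of_le hx hbc)
          have hnbx : ¬ b < x := fun hh => h2 hh.le
          simp [pvStepA, pvLeE, h1, h2, ha, hxc, hnbx]
        · have hx : x < a := lt_of_not_ge ha
          obtain ⟨p, q, hsq, hins, hp⟩ := pvIns_parts x (u ++ [a, b, c])
          have hpu : p <+: u ∨ u <+: p :=
            List.prefix_or_prefix_of_prefix (hsq ▸ ⟨q, rfl⟩) ⟨[a, b, c], rfl⟩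
          have hw : ∃ w, pvIns x (u ++ [a, b, c]) = w ++ [a, b, c] := by
            rcases hpu with ⟨r, hr⟩ | ⟨r, hr⟩
            · -- u = p ++ r, so q = r ++ [a,b,c]
              subst hr
              have hq : q = r ++ [a, b, c] := by
                have := hsq
                rw [List.append_assoc] at this
                exact (List.append_cancel_left this).symm
              exact ⟨p ++ x :: r, by rw [hins, hq]; simp⟩
            · -- p = u ++ r with r ++ q = [a,b,c]
              subst hr
              have hq : r ++ q = [a, b, c] := (List.append_cancel_left (by
                rw [← List.append_assoc]; exact hsq)).symm
              rcases r with _ | ⟨r0, r'⟩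
              · simp at hq
                exact ⟨u ++ [x], by rw [hins, hq]; simp⟩
              · exfalso
                have hr0 : r0 = a := by
                  have := congrArg (fun l => l.head?) hq
                  simpa using this
                have : r0 ≤ x := hp r0 (by simp)
                omega
          obtain ⟨w, hw⟩ := hw
          rw [hw, pvMk3_append]
          simp [pvStepA, pvLeE, h1, h2, ha]
  · rcases s with _ | ⟨a, _ | ⟨b, _ | ⟨c, t⟩⟩⟩
    · rfl
    · by_cases ha : a ≤ x <;>
        simp [pvStepA, pvMk3, pvIns, pvLeE, PySem.List.insertBy, ha, not_lt.mpr,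
          lt_of_not_ge, le_of_lt]
    · have hab : a ≤ b := (List.pairwise_cons.mp hs).1 b (by simp)
      by_cases hbx : b ≤ x
      · have hax : a ≤ x := le_trans hab hbx
        simp [pvStepA, pvMk3, pvIns, pvLeE, PySem.List.insertBy, hbx,
          not_lt.mpr hbx, not_lt.mpr hax]
      · by_cases hax : a ≤ x
        · have hxb : x < b := lt_of_not_ge hbx
          simp [pvStepA, pvMk3, pvIns, pvLeE, PySem.List.insertBy, hbx, hax, hxb,
            not_lt.mpr hax, le_of_lt hxb]
        · have hxa : x < a := lt_of_not_ge hax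
          simp [pvStepA, pvMk3, pvIns, pvLeE, PySem.List.insertBy, hbx, hax, hxa,
            le_of_lt hxa, le_of_lt (lt_of_lt_of_le hxa hab)]
    · exact absurd (by simp only [List.length_cons]; omega) h3

theorem pv_main (xs l : List Int) :
    xs.foldl pvStepA (pvMk3 (PySem.List.sorted l (fun x => x) false)) =
      pvMk3 (PySem.List.sorted (l ++ xs) (fun x => x) false) := by
  induction xs generalizing l with
  | nil => rw [List.foldl_nil, List.append_nil]
  | cons x xs ih =>
    have hstep : pvStepA (pvMk3 (PySem.List.sorted l (fun x => x) false)) x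
        = pvMk3 (PySem.List.sorted (l ++ [x]) (fun x => x) false) := by
      rw [pvStepA_mk3 _ (PySem.List.sorted_pairwise l (fun x => x)) x]
      congr 1
      rw [PySem.List.sorted_eq_foldl_insertBy, PySem.List.sorted_eq_foldl_insertBy,
        List.foldl_append]
      rfl
    rw [List.foldl_cons, hstep, show l ++ x :: xs = (l ++ [x]) ++ xs by simp]
    exact ih (l ++ [x])

-- ===== VERDICT (by name: the statement is the Claim_ definition above) =====
theorem find_three_largest_numbers_elif_spec : Claim_equal_find_three_largest_numbers_elif := by
  intro array _ hpre
  unfold Spec_find_three_largest_numbers_elif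
  unfold Pre_find_three_largest_numbers_elif at hpre
  have hfold := PySem.List.foldl_pyRange_pyGetD array 0 pvStepA [none, none, none]
      (a := 0) (by norm_num)
  unfold find_three_largest_numbers_elif find_three_largest_numbers_elif_alt
  rw [hfold]
  simp only [Int.toNat_zero, List.drop_zero]
  have h0 : ([none, none, none] : List (Option Int))
      = pvMk3 (PySem.List.sorted ([] : List Int) (fun x => x) false) := rfl
  rw [h0, pv_main array []]
  simp only [List.nil_append]
  have hlen : 3 ≤ (PySem.List.sorted array (fun x => x) false).length := by
    rw [PySem.List.length_sorted]; exact hpre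
  rw [PySem.List.slice_from_neg_ofNat _ 3 (by norm_num)]
  unfold pvMk3
  rw [show 3 - (PySem.List.sorted array (fun x => x) false).length = 0 by omega]
  rw [PySem.List.length_sorted]
  simp only [List.replicate_zero, List.nil_append]
  simp
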